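-- pv_equiv track=rewrite | github.com/Nghia03092004/nghia03092004.github.io | project_euler/problem_403/solution.py | S_linear
-- ===== SOURCE A (Python) =====
-- import math
--
-- def P(K):
--     """Prefix sum: sum_{s=0}^{K} L(s)."""
--     if K < 0:
--         return 0
--     return (K + 1) * (K + 2) * (K * K - K + 12) // 24
--
-- def S_linear(N):
--     """O(N) algorithm using the u-parametrization."""
--     total = 0
--     sq = int(math.isqrt(N))
--
--     # u = 0: s in [0, N]
--     total += P(N)
--
--     # u >= 1: a = s + 2u, b = u(s+u), need |a| <= N and |b| <= N
--     for u in range(1, sq + 1):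
--         s_hi = min((N - u * u) // u, N - 2 * u)
--         if s_hi >= 0:
--             total += P(s_hi)
--
--     # v >= 1 (u = -v): a = s - 2v, b = -v(s-v)
--     for v in range(1, sq + 1):
--         s_hi = v + N // v
--         s_lo = max(0, 2 * v - N)
--         if s_hi >= s_lo:
--             total += P(s_hi) - P(s_lo - 1)
--
--     for v in range(sq + 1, N + 1):
--         q = N // v
--         s_hi = v + q
--         s_lo = max(v - q, 2 * v - N, 0)
--         if s_lo <= s_hi:
--             total += P(s_hi) - P(s_lo - 1)
--
--     return total
-- ===== SOURCE B (Python) =====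
-- import math
--
-- def _P(K):
--     """Count for one s: sum_{s'=0}^{K} L(s') ... same value as A's P, computed via staged exact divisions."""
--     if K < 0:
--         return 0
--     return (K + 1) * (K + 2) // 2 * (K * K - K + 12) // 12
--
-- def _PP(K):
--     """Second prefix sum: sum_{j=0}^{K} P(j), in closed form."""
--     if K < 0:
--         return 0
--     return (K + 1) * (K + 2) * (K + 3) * (K * K - K + 20) // 120
--
-- def S_linear(N):
--     """O(sqrt(N)): the v-sum is evaluated over divisor blocks (N//v constant) via the
--     closed-form second prefix sum _PP; only the O(sqrt(N)) many v with v > N - N//v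
--     need an explicit term."""
--     total = _P(N)                      # u = 0
--     sq = math.isqrt(N)
--     for u in range(1, sq + 1):         # u >= 1 (already O(sqrt N))
--         hi = min(N // u - u, N - 2 * u)
--         if hi >= 0:
--             total += _P(hi)
--     # v >= 1: term(v) = P(v + q) - P(max(v - q, 2*v - N, 0) - 1) with q = N // v
--     v = 1
--     while v <= N:
--         q = N // v
--         b = N // q                     # largest v' with N // v' == q
--         total += _PP(b + q) - _PP(v + q - 1)          # sum of P(v' + q), v' in [v, b]
--         t = min(b, N - q)              # for v' <= N - q the max is max(v' - q, 0)
--         if t >= v: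
--             total -= _PP(t - q - 1) - _PP(v - q - 2)
--         for w in range(max(v, N - q + 1), b + 1):     # v' > N - q: the max is max(2v' - N, 0)
--             total -= _P(max(2 * w - N, 0) - 1)
--         v = b + 1
--     return total
-- ===== Notes on version B (the rewrite author's own statement) =====
-- stated objective: faster
-- what changed: A's O(N) loop over v (with N//v recomputed for every v up to N) is replaced by divisor-block decomposition: v is advanced block-by-block over the O(sqrt N) ranges on which q = N//v is constant, and each block's sum of prefix-sum terms P(...) is evaluated in O(1) via the closed-form second prefix sum PP(K) = (K+1)(K+2)(K+3)(K^2-K+20)//120, leaving only the O(sqrt N) many v with v > N - N//v as explicit terms.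
import Mathlib
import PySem

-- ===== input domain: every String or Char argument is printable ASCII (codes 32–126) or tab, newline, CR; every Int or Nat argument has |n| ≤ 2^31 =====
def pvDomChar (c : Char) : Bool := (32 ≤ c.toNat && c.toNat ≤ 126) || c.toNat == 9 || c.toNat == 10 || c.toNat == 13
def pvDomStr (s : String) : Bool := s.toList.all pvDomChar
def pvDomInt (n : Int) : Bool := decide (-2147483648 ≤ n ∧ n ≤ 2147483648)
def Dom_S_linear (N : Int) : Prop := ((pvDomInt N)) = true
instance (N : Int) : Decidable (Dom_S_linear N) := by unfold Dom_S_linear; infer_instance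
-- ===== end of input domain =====

-- B replaces A's O(N) loop over v by divisor-block decomposition (N//v constant per
-- block) with a closed-form second prefix sum; proved equal to A on all of Pre_.

-- ===== PORT A =====
-- helper P(K) of Source A: (K+1)(K+2)(K^2-K+12)//24, 0 for K < 0
def pvP (K : Int) : Int :=
  if K < 0 then 0
  else PySem.Int.floordiv ((K + 1) * (K + 2) * (K * K - K + 12)) 24

def S_linear (N : Int) : Int :=
  -- math.isqrt(N): ported by hand as Nat.sqrt on N.toNat — exact for 0 ≤ N;
  -- Pre_ excludes N < 0, where math.isqrt raises ValueError.
  let sq : Int := (Nat.sqrt N.toNat : Int)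
  let total : Int := 0 + pvP N
  let total := (PySem.List.pyRange 1 (sq + 1)).foldl (fun total u =>
    let s_hi := min (PySem.Int.floordiv (N - u * u) u) (N - 2 * u)
    if s_hi ≥ 0 then total + pvP s_hi else total) total
  let total := (PySem.List.pyRange 1 (sq + 1)).foldl (fun total v =>
    let s_hi := v + PySem.Int.floordiv N v
    let s_lo := max 0 (2 * v - N)
    if s_hi ≥ s_lo then total + (pvP s_hi - pvP (s_lo - 1)) else total) total
  let total := (PySem.List.pyRange (sq + 1) (N + 1)).foldl (fun total v =>
    let q := PySem.Int.floordiv N v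
    let s_hi := v + q
    let s_lo := max (max (v - q) (2 * v - N)) 0
    if s_lo ≤ s_hi then total + (pvP s_hi - pvP (s_lo - 1)) else total) total
  total

-- ===== PORT B =====
-- helper _P(K) of Source B: same value as A's P, via staged exact divisions
def pvPB (K : Int) : Int :=
  if K < 0 then 0
  else PySem.Int.floordiv (PySem.Int.floordiv ((K + 1) * (K + 2)) 2 * (K * K - K + 12)) 12

-- helper _PP(K) of Source B: closed-form second prefix sum (K+1)(K+2)(K+3)(K^2-K+20)//120
def pvPP (K : Int) : Int :=
  if K < 0 then 0
  else PySem.Int.floordiv ((K + 1) * (K + 2) * (K + 3) * (K * K - K + 20)) 120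

-- the while-loop of Source B, ported with a fuel parameter (structural recursion);
-- fuel = N.toNat + 1 bounds the iteration count: v strictly increases each round,
-- so the guard v ≤ N fails before fuel runs out and the fuel never changes the value.
def pvBlocks (N : Int) : Nat → Int → Int → Int
  | 0, _, total => total
  | fuel + 1, v, total =>
    if v ≤ N then
      let q := PySem.Int.floordiv N v
      let b := PySem.Int.floordiv N q
      let total := total + (pvPP (b + q) - pvPP (v + q - 1))
      let t := min b (N - q)
      let total := if t ≥ v then total - (pvPP (t - q - 1) - pvPP (v - q - 2)) else total
      let total := (PySem.List.pyRange (max v (N - q + 1)) (b + 1)).foldl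
        (fun total w => total - pvPB (max (2 * w - N) 0 - 1)) total
      pvBlocks N fuel (b + 1) total
    else total

def S_linear_alt (N : Int) : Int :=
  let total : Int := pvPB N
  -- math.isqrt(N), as in port A: exact for 0 ≤ N
  let sq : Int := (Nat.sqrt N.toNat : Int)
  let total := (PySem.List.pyRange 1 (sq + 1)).foldl (fun total u =>
    let hi := min (PySem.Int.floordiv N u - u) (N - 2 * u)
    if hi ≥ 0 then total + pvPB hi else total) total
  pvBlocks N (N.toNat + 1) 1 total

-- ===== PRECONDITION & SPEC =====
-- Pre_ excludes exactly N < 0, where A raises ValueError (math.isqrt of a negative).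
def Pre_S_linear (N : Int) : Prop := 0 ≤ N
instance (N : Int) : Decidable (Pre_S_linear N) := by unfold Pre_S_linear; infer_instance
def pvWitness_S_linear : Int := 7

def Spec_S_linear (N : Int) (out : Int) : Prop := out = S_linear_alt N
instance (N : Int) (out : Int) : Decidable (Spec_S_linear N out) := by unfold Spec_S_linear; infer_instance

-- ===== CLAIM (what is proved, stated in full; the proofs are below) =====
def Claim_equal_S_linear : Prop := ∀ (N : Int), Dom_S_linear N → Pre_S_linear N → Spec_S_linear N (S_linear N)

-- ===== LEMMAS AND PROOFS =====

-- the per-v term of the v-parametrised sum, common mathematical form of both programs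
def pvT (N v : Int) : Int :=
  pvP (v + PySem.Int.floordiv N v)
    - pvP (max (max (v - PySem.Int.floordiv N v) (2 * v - N)) 0 - 1)

-- the u ≥ 1 partial sum, common mathematical form of both programs
def pvU (N : Int) : Int :=
  ((PySem.List.pyRange 1 ((Nat.sqrt N.toNat : Int) + 1)).map (fun u =>
    if min (PySem.Int.floordiv N u - u) (N - 2 * u) ≥ 0
    then pvP (min (PySem.Int.floordiv N u - u) (N - 2 * u)) else 0)).sum

lemma pv_dvd2 (K : Int) : (2 : Int) ∣ (K + 1) * (K + 2) := by
  have h : ((((K + 1) * (K + 2) : Int) : ZMod 2)) = 0 := by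
    push_cast
    generalize (K : ZMod 2) = x
    revert x; decide
  exact_mod_cast (ZMod.intCast_zmod_eq_zero_iff_dvd _ 2).mp h

lemma pv_dvd24 (K : Int) : (24 : Int) ∣ (K + 1) * (K + 2) * (K * K - K + 12) := by
  have h8 : ((((K + 1) * (K + 2) * (K * K - K + 12) : Int) : ZMod 8)) = 0 := by
    push_cast
    generalize (K : ZMod 8) = x
    revert x; decide
  have h3 : ((((K + 1) * (K + 2) * (K * K - K + 12) : Int) : ZMod 3)) = 0 := by
    push_cast
    generalize (K : ZMod 3) = x
    revert x; decide
  have d8 : (8 : Int) ∣ (K + 1) * (K + 2) * (K * K - K + 12) := by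
    exact_mod_cast (ZMod.intCast_zmod_eq_zero_iff_dvd _ 8).mp h8
  have d3 : (3 : Int) ∣ (K + 1) * (K + 2) * (K * K - K + 12) := by
    exact_mod_cast (ZMod.intCast_zmod_eq_zero_iff_dvd _ 3).mp h3
  omega

lemma pv_dvd120 (K : Int) : (120 : Int) ∣ (K + 1) * (K + 2) * (K + 3) * (K * K - K + 20) := by
  have h8 : ((((K + 1) * (K + 2) * (K + 3) * (K * K - K + 20) : Int) : ZMod 8)) = 0 := by
    push_cast
    generalize (K : ZMod 8) = x
    revert x; decide
  have h3 : ((((K + 1) * (K + 2) * (K + 3) * (K * K - K + 20) : Int) : ZMod 3)) = 0 := by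
    push_cast
    generalize (K : ZMod 3) = x
    revert x; decide
  have h5 : ((((K + 1) * (K + 2) * (K + 3) * (K * K - K + 20) : Int) : ZMod 5)) = 0 := by
    push_cast
    generalize (K : ZMod 5) = x
    revert x; decide
  have d8 : (8 : Int) ∣ (K + 1) * (K + 2) * (K + 3) * (K * K - K + 20) := by
    exact_mod_cast (ZMod.intCast_zmod_eq_zero_iff_dvd _ 8).mp h8
  have d3 : (3 : Int) ∣ (K + 1) * (K + 2) * (K + 3) * (K * K - K + 20) := by
    exact_mod_cast (ZMod.intCast_zmod_eq_zero_iff_dvd _ 3).mp h3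
  have d5 : (5 : Int) ∣ (K + 1) * (K + 2) * (K + 3) * (K * K - K + 20) := by
    exact_mod_cast (ZMod.intCast_zmod_eq_zero_iff_dvd _ 5).mp h5
  omega

lemma pv_fdiv_mul_cancel (d x : Int) (hd : d ≠ 0) : PySem.Int.floordiv (d * x) d = x := by
  simp [PySem.Int.floordiv, Int.mul_fdiv_cancel_left x hd]

lemma pvPB_eq_pvP (K : Int) : pvPB K = pvP K := by
  unfold pvPB pvP
  split
  · rfl
  · obtain ⟨e, he⟩ := pv_dvd2 K
    obtain ⟨c, hc⟩ := pv_dvd24 K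
    have h1 : (K + 1) * (K + 2) = 2 * e := he
    have h2 : e * (K * K - K + 12) = 12 * c := by nlinarith [he, hc]
    have h3 : 2 * e * (K * K - K + 12) = 24 * c := by nlinarith [h2]
    rw [h1, pv_fdiv_mul_cancel 2 e (by norm_num), h2,
      pv_fdiv_mul_cancel 12 c (by norm_num), h3,
      pv_fdiv_mul_cancel 24 c (by norm_num)]

lemma pvPP_step (K : Int) : pvPP K = pvPP (K - 1) + pvP K := by
  rcases lt_trichotomy K 0 with h | h | h
  · have h' : K - 1 < 0 := by omega
    simp [pvPP, pvP, h, h']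
  · subst h; decide
  · obtain ⟨a, ha⟩ := pv_dvd120 K
    obtain ⟨c, hc⟩ := pv_dvd24 K
    have hK1 : ¬ (K < 0) := by omega
    have hK2 : ¬ (K - 1 < 0) := by omega
    have hg : (K - 1 + 1) * (K - 1 + 2) * (K - 1 + 3) * ((K - 1) * (K - 1) - (K - 1) + 20)
        = 120 * (a - c) := by nlinarith [ha, hc]
    unfold pvPP pvP
    rw [if_neg hK1, if_neg hK2, if_neg hK1, ha, hg, hc,
      pv_fdiv_mul_cancel 120 a (by norm_num),
      pv_fdiv_mul_cancel 120 (a - c) (by norm_num),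
      pv_fdiv_mul_cancel 24 c (by norm_num)]
    ring

lemma pv_sumP (c : Int) : ∀ (n : Nat) (a : Int),
    ((PySem.List.pyRange a (a + n)).map (fun w => pvP (w + c))).sum
      = pvPP (a + n - 1 + c) - pvPP (a - 1 + c) := by
  intro n
  induction n with
  | zero =>
    intro a
    simp
  | succ n ih =>
    intro a
    have hb : (a + ((n + 1 : Nat) : Int)) = (a + n) + 1 := by push_cast; ring
    rw [hb, PySem.List.pyRange_one_succ_right (by omega), List.map_append,
      List.sum_append, ih]
    have hs := pvPP_step (a + (n : Int) + c)
    simp only [List.map_cons, List.map_nil, List.sum_cons, List.sum_nil]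
    ring_nf at hs ⊢
    linarith [hs]

lemma pv_sumP' (a b c : Int) (h : a ≤ b) :
    ((PySem.List.pyRange a b).map (fun w => pvP (w + c))).sum
      = pvPP (b - 1 + c) - pvPP (a - 1 + c) := by
  have hb : b = a + ((b - a).toNat : Int) := by omega
  rw [hb, pv_sumP c (b - a).toNat a]

lemma pv_fdiv_nonneg {N v : Int} (hN : 0 ≤ N) (hv : 0 < v) : 0 ≤ PySem.Int.floordiv N v :=
  (PySem.Int.le_floordiv_iff_mul_le hv).mpr (by omega)

lemma pv_fdiv_mul_le {N v : Int} (hv : 0 < v) : PySem.Int.floordiv N v * v ≤ N := by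
  have h1 := PySem.Int.floordiv_mul_add_mod N v
  have h2 := PySem.Int.mod_nonneg N hv
  omega

lemma pv_fdiv_antitone {N v w : Int} (hN : 0 ≤ N) (hv : 0 < v) (hvw : v ≤ w) :
    PySem.Int.floordiv N w ≤ PySem.Int.floordiv N v := by
  have hw : 0 < w := by omega
  have h1 : PySem.Int.floordiv N w * w ≤ N := pv_fdiv_mul_le hw
  have h0 : 0 ≤ PySem.Int.floordiv N w := pv_fdiv_nonneg hN hw
  refine (PySem.Int.le_floordiv_iff_mul_le hv).mpr ?_
  nlinarith

-- inside a divisor block the quotient is constant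
lemma pv_fdiv_const {N v w : Int} (hN : 0 ≤ N) (hv : 0 < v) (hvw : v ≤ w)
    (hwb : w ≤ PySem.Int.floordiv N (PySem.Int.floordiv N v)) :
    PySem.Int.floordiv N w = PySem.Int.floordiv N v := by
  have hq0 : 0 ≤ PySem.Int.floordiv N v := pv_fdiv_nonneg hN hv
  have hw : 0 < w := by omega
  have hle : PySem.Int.floordiv N w ≤ PySem.Int.floordiv N v := pv_fdiv_antitone hN hv hvw
  have hq1 : 0 < PySem.Int.floordiv N v := by
    rcases lt_or_eq_of_le hq0 with h | h
    · exact h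
    · exfalso
      rw [← h] at hwb
      have h0 : PySem.Int.floordiv N 0 = 0 := by simp [PySem.Int.floordiv]
      omega
  have hge : PySem.Int.floordiv N v ≤ PySem.Int.floordiv N w := by
    refine (PySem.Int.le_floordiv_iff_mul_le hw).mpr ?_
    have := pv_fdiv_mul_le (N := N) (v := PySem.Int.floordiv N v) hq1
    nlinarith
  omega

lemma pv_sqrt_le {N : Int} (hN : 0 ≤ N) : (Nat.sqrt N.toNat : Int) ≤ N := by
  have := Nat.sqrt_le_self N.toNat
  omega

lemma pv_le_sqrt_mul {N v : Int} (hN : 0 ≤ N) (hv : 0 < v)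
    (h : v ≤ (Nat.sqrt N.toNat : Int)) : v * v ≤ N := by
  have h1 : v.toNat ≤ Nat.sqrt N.toNat := by omega
  have h2 : v.toNat * v.toNat ≤ N.toNat := Nat.le_sqrt.mp h1
  have h3 : v = (v.toNat : Int) := by omega
  rw [h3]
  omega

lemma pv_fdiv_shift (N u : Int) (hu : u ≠ 0) :
    PySem.Int.floordiv (N - u * u) u = PySem.Int.floordiv N u - u := by
  have h : N - u * u = N + (-u) * u := by ring
  simp only [PySem.Int.floordiv, h, Int.add_mul_fdiv_right N (-u) hu]
  ring

lemma pv_sum_map_sub (l : List Int) (f g : Int → Int) :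
    (l.map (fun x => f x - g x)).sum = (l.map f).sum - (l.map g).sum := by
  induction l with
  | nil => simp
  | cons x xs ih => simp only [List.map_cons, List.sum_cons, ih]; ring

lemma pv_sum_map_neg (l : List Int) (f : Int → Int) :
    (l.map (fun x => -(f x))).sum = -((l.map f).sum) := by
  induction l with
  | nil => simp
  | cons x xs ih => simp only [List.map_cons, List.sum_cons, ih]; ring

-- A's three loops, re-expressed as the common sums
lemma pv_A_eq (N : Int) (hN : 0 ≤ N) :
    S_linear N = pvP N + pvU N + ((PySem.List.pyRange 1 (N + 1)).map (pvT N)).sum := by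
  unfold S_linear
  dsimp only
  have hsq0 : (0 : Int) ≤ (Nat.sqrt N.toNat : Int) := by positivity
  have hsqN : (Nat.sqrt N.toNat : Int) ≤ N := pv_sqrt_le hN
  -- last v-loop: the guard always holds
  rw [PySem.List.foldl_congr_mem _ _ (fun total v => total + pvT N v) _
    (by
      intro acc v hv
      rw [PySem.List.mem_pyRange_one] at hv
      have hq0 : 0 ≤ PySem.Int.floordiv N v := pv_fdiv_nonneg hN (by omega)
      simp only
      rw [if_pos (by omega)]
      rfl)]
  rw [PySem.List.foldl_add]
  -- middle v-loop: v ≤ isqrt N, so v ≤ N // v and the guard always holds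
  rw [PySem.List.foldl_congr_mem _ _ (fun total v => total + pvT N v) _
    (by
      intro acc v hv
      rw [PySem.List.mem_pyRange_one] at hv
      have hv1 : (1 : Int) ≤ v := hv.1
      have hvsq : v ≤ (Nat.sqrt N.toNat : Int) := by omega
      have hvv : v * v ≤ N := pv_le_sqrt_mul hN (by omega) hvsq
      have hq : v ≤ PySem.Int.floordiv N v :=
        (PySem.Int.le_floordiv_iff_mul_le (by omega)).mpr hvv
      have hq0 : 0 ≤ PySem.Int.floordiv N v := pv_fdiv_nonneg hN (by omega)
      have hvN : v ≤ N := by omega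
      simp only
      rw [if_pos (by omega)]
      have hmax : max 0 (2 * v - N) = max (max (v - PySem.Int.floordiv N v) (2 * v - N)) 0 := by
        omega
      rw [hmax]
      rfl)]
  rw [PySem.List.foldl_add]
  -- u-loop
  rw [PySem.List.foldl_congr_mem _ _
    (fun total u => total +
      (if min (PySem.Int.floordiv N u - u) (N - 2 * u) ≥ 0
       then pvP (min (PySem.Int.floordiv N u - u) (N - 2 * u)) else 0)) _
    (by
      intro acc u hu
      rw [PySem.List.mem_pyRange_one] at hu
      simp only [pv_fdiv_shift N u (by omega)]
      split <;> ring)]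
  rw [PySem.List.foldl_add]
  rw [PySem.List.pyRange_one_append 1 ((Nat.sqrt N.toNat : Int) + 1) (N + 1) (by omega) (by omega),
    List.map_append, List.sum_append]
  unfold pvU
  ring

-- one divisor block of the v-sum equals B's closed-form contribution
lemma pv_block (N v : Int) (hN : 0 ≤ N) (hv : 1 ≤ v) (hvN : v ≤ N) :
    ((PySem.List.pyRange v (PySem.Int.floordiv N (PySem.Int.floordiv N v) + 1)).map (pvT N)).sum
      = (pvPP (PySem.Int.floordiv N (PySem.Int.floordiv N v) + PySem.Int.floordiv N v)
          - pvPP (v + PySem.Int.floordiv N v - 1))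
        - (if min (PySem.Int.floordiv N (PySem.Int.floordiv N v)) (N - PySem.Int.floordiv N v) ≥ v
           then pvPP (min (PySem.Int.floordiv N (PySem.Int.floordiv N v)) (N - PySem.Int.floordiv N v)
                        - PySem.Int.floordiv N v - 1)
                - pvPP (v - PySem.Int.floordiv N v - 2)
           else 0)
        - ((PySem.List.pyRange (max v (N - PySem.Int.floordiv N v + 1))
              (PySem.Int.floordiv N (PySem.Int.floordiv N v) + 1)).map
            (fun w => pvP (max (2 * w - N) 0 - 1))).sum := by
  have hv0 : (0 : Int) < v := by omega
  set q := PySem.Int.floordiv N v with hqdef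
  have hq1 : 1 ≤ q := (PySem.Int.le_floordiv_iff_mul_le hv0).mpr (by omega)
  have hqv : q * v ≤ N := pv_fdiv_mul_le hv0
  set b := PySem.Int.floordiv N q with hbdef
  have hvb : v ≤ b := (PySem.Int.le_floordiv_iff_mul_le (by omega)).mpr (by nlinarith)
  have hbq : b * q ≤ N := pv_fdiv_mul_le (by omega)
  have hbN : b ≤ N := by nlinarith
  have htv : v - 1 ≤ N - q := by nlinarith
  have hconst : ∀ w, v ≤ w → w ≤ b → PySem.Int.floordiv N w = q := by
    intro w h1 h2
    exact pv_fdiv_const hN hv0 h1 (hbdef ▸ h2)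
  -- split each term into its two pvP parts
  rw [List.map_congr_left (g := fun w =>
      pvP (w + q) - pvP (max (max (w - q) (2 * w - N)) 0 - 1)) (by
    intro w hw
    rw [PySem.List.mem_pyRange_one] at hw
    unfold pvT
    rw [hconst w hw.1 (by omega)])]
  rw [pv_sum_map_sub]
  rw [pv_sumP' v (b + 1) q (by omega)]
  set t := min b (N - q) with htdef
  -- split the subtracted sum at t + 1
  rw [PySem.List.pyRange_one_append v (t + 1) (b + 1) (by omega) (by omega),
    List.map_append, List.sum_append]
  -- first piece: the max is max (w - q) 0
  rw [List.map_congr_left (g := fun w => pvP (w + (-q - 1))) (by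
    intro w hw
    rw [PySem.List.mem_pyRange_one] at hw
    rcases le_or_gt (w - q) 0 with hle | hlt
    · have h1 : max (max (w - q) (2 * w - N)) 0 = 0 := by omega
      rw [h1]
      simp only [pvP]
      rw [if_pos (by norm_num), if_pos (by omega)]
    · have h1 : max (max (w - q) (2 * w - N)) 0 - 1 = w + (-q - 1) := by omega
      rw [h1])]
  rw [pv_sumP' v (t + 1) (-q - 1) (by omega)]
  -- second piece: the max is max (2w - N) 0, over exactly B's explicit range
  have hrange : PySem.List.pyRange (t + 1) (b + 1)
      = PySem.List.pyRange (max v (N - q + 1)) (b + 1) := by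
    rcases le_or_gt (N - q) b with hc | hc
    · have h1 : t = N - q := by omega
      have h2 : max v (N - q + 1) = N - q + 1 := by omega
      rw [h1, h2]
    · have h1 : t = b := by omega
      rw [PySem.List.pyRange_one_eq_nil (by omega),
        PySem.List.pyRange_one_eq_nil (by omega)]
  rw [hrange]
  rw [List.map_congr_left (g := fun w => pvP (max (2 * w - N) 0 - 1)) (by
    intro w hw
    rw [PySem.List.mem_pyRange_one] at hw
    have hw1 : N - q + 1 ≤ w := le_trans (le_max_right _ _) hw.1
    have h1 : max (max (w - q) (2 * w - N)) 0 = max (2 * w - N) 0 := by omega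
    rw [h1])]
  -- close with case analysis on the if
  rcases le_or_gt v t with hvt | hvt
  · rw [if_pos (by omega)]
    have e1 : b + 1 - 1 + q = b + q := by ring
    have e2 : v - 1 + q = v + q - 1 := by ring
    have e3 : t + 1 - 1 + (-q - 1) = t - q - 1 := by ring
    have e4 : v - 1 + (-q - 1) = v - q - 2 := by ring
    rw [e1, e2, e3, e4]
    ring
  · rw [if_neg (by omega)]
    have ht1 : t = v - 1 := by omega
    have e1 : b + 1 - 1 + q = b + q := by ring
    have e2 : v - 1 + q = v + q - 1 := by ring
    have e3 : t + 1 - 1 + (-q - 1) = v - q - 2 := by rw [ht1]; ring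
    have e4 : v - 1 + (-q - 1) = v - q - 2 := by ring
    rw [e1, e2, e3, e4]
    ring

-- the while loop accumulates the whole remaining v-sum (for any sufficient fuel)
lemma pv_blocks_eq (N : Int) (hN : 0 ≤ N) : ∀ (k fuel : Nat) (v total : Int), 1 ≤ v →
    (N + 1 - v).toNat = k → k ≤ fuel →
    pvBlocks N fuel v total = total + ((PySem.List.pyRange v (N + 1)).map (pvT N)).sum := by
  intro k
  induction k using Nat.strong_induction_on with
  | _ k ih =>
    intro fuel v total hv hk hf
    cases fuel with
    | zero =>
      have hvN : N + 1 ≤ v := by omega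
      rw [pvBlocks, PySem.List.pyRange_one_eq_nil (by omega)]
      simp
    | succ fuel =>
      rw [pvBlocks]
      by_cases hvN : v ≤ N
      · rw [if_pos hvN]
        dsimp only
        have hv0 : (0 : Int) < v := by omega
        set q := PySem.Int.floordiv N v with hqdef
        have hq1 : 1 ≤ q := (PySem.Int.le_floordiv_iff_mul_le hv0).mpr (by omega)
        have hqv : q * v ≤ N := pv_fdiv_mul_le hv0
        set b := PySem.Int.floordiv N q with hbdef
        have hvb : v ≤ b := (PySem.Int.le_floordiv_iff_mul_le (by omega)).mpr (by nlinarith)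
        have hbq : b * q ≤ N := pv_fdiv_mul_le (by omega)
        have hbN : b ≤ N := by nlinarith
        rw [ih (N + 1 - (b + 1)).toNat (by omega) fuel (b + 1) _ (by omega) rfl (by omega)]
        -- turn the piece-2 foldl into a sum
        rw [PySem.List.foldl_congr_mem _ _
          (fun total w => total + (-(pvP (max (2 * w - N) 0 - 1)))) _ (by
            intro acc w _
            rw [pvPB_eq_pvP]
            ring)]
        rw [PySem.List.foldl_add, pv_sum_map_neg]
        -- recombine the two ranges
        rw [PySem.List.pyRange_one_append v (b + 1) (N + 1) (by omega) (by omega),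
          List.map_append, List.sum_append]
        have hblk := pv_block N v hN hv hvN
        rw [← hqdef, ← hbdef] at hblk
        rw [hblk]
        split <;> ring
      · rw [if_neg hvN]
        rw [PySem.List.pyRange_one_eq_nil (by omega)]
        simp

-- B, re-expressed as the same common sums
lemma pv_B_eq (N : Int) (hN : 0 ≤ N) :
    S_linear_alt N = pvP N + pvU N + ((PySem.List.pyRange 1 (N + 1)).map (pvT N)).sum := by
  unfold S_linear_alt
  dsimp only
  simp only [pvPB_eq_pvP]
  rw [PySem.List.foldl_congr_mem _ _
    (fun total u => total +
      (if min (PySem.Int.floordiv N u - u) (N - 2 * u) ≥ 0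
       then pvP (min (PySem.Int.floordiv N u - u) (N - 2 * u)) else 0)) _
    (by
      intro acc u _
      dsimp only
      by_cases hc : min (PySem.Int.floordiv N u - u) (N - 2 * u) ≥ 0
      · rw [if_pos hc, if_pos hc]
      · rw [if_neg hc, if_neg hc]
        ring)]
  rw [PySem.List.foldl_add]
  rw [pv_blocks_eq N hN (N + 1 - 1).toNat (N.toNat + 1) 1 _ (by omega) rfl (by omega)]
  unfold pvU
  ring

-- ===== VERDICT (by name: the statement is the Claim_ definition above) =====
theorem S_linear_spec : Claim_equal_S_linear := by
  intro N _ hPre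
  unfold Spec_S_linear
  rw [pv_A_eq N hPre, pv_B_eq N hPre]
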